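-- pv_equiv track=rewrite | github.com/Kubis4/PVmizer-GEO | ui/styles/left_panel_styles.py | get_model3d_slider_style
-- ===== SOURCE A (Python) =====
-- def get_model3d_slider_style(slider_type="building"):
--     """Slider styles for Model3D panel"""
--     if slider_type == "building":
--         return """
--             QSlider::groove:horizontal {
--                 border: 1px solid #dee2e6;
--                 background: #f8f9fa;
--                 height: 8px;
--                 border-radius: 4px;
--             }
--             QSlider::handle:horizontal {
--                 background: #3498db;
--                 border: 1px solid #3498db;
--                 width: 18px;
--                 margin: -5px 0;
--                 border-radius: 9px;
--             }
--             QSlider::handle:horizontal:hover {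
--                 background: #2980b9;
--             }
--         """
--     elif slider_type == "solar":
--         return """
--             QSlider::groove:horizontal {
--                 border: 1px solid #dee2e6;
--                 background: #f8f9fa;
--                 height: 8px;
--                 border-radius: 4px;
--             }
--             QSlider::handle:horizontal {
--                 background: #f39c12;
--                 border: 1px solid #f39c12;
--                 width: 18px;
--                 margin: -5px 0;
--                 border-radius: 9px;
--             }
--             QSlider::handle:horizontal:hover {
--                 background: #e67e22;
--             }
--         """
--
--     return get_model3d_slider_style("building")
-- ===== SOURCE B (Python) =====
-- def get_model3d_slider_style(slider_type="building"):
--     """Slider styles for Model3D panel"""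
--     accent, hover = ("#f39c12", "#e67e22") if slider_type == "solar" else ("#3498db", "#2980b9")
--     blocks = [
--         ("QSlider::groove:horizontal", [
--             ("border", "1px solid #dee2e6"),
--             ("background", "#f8f9fa"),
--             ("height", "8px"),
--             ("border-radius", "4px"),
--         ]),
--         ("QSlider::handle:horizontal", [
--             ("background", accent),
--             ("border", "1px solid " + accent),
--             ("width", "18px"),
--             ("margin", "-5px 0"),
--             ("border-radius", "9px"),
--         ]),
--         ("QSlider::handle:horizontal:hover", [
--             ("background", hover),
--         ]),
--     ]
--     out = "\n"
--     for sel, props in blocks: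
--         out += "            " + sel + " {\n"
--         for name, val in props:
--             out += "                " + name + ": " + val + ";\n"
--         out += "            }\n"
--     return out + "        "
-- ===== Notes on version B (the rewrite author's own statement) =====
-- stated objective: alternative
-- what changed: Replaces A's two full duplicated CSS string literals plus a recursive default fallback by a structured representation (a list of (selector, property-list) blocks with the accent/hover colors chosen once) which a nested rendering loop serializes into the CSS string.
import Mathlib
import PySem

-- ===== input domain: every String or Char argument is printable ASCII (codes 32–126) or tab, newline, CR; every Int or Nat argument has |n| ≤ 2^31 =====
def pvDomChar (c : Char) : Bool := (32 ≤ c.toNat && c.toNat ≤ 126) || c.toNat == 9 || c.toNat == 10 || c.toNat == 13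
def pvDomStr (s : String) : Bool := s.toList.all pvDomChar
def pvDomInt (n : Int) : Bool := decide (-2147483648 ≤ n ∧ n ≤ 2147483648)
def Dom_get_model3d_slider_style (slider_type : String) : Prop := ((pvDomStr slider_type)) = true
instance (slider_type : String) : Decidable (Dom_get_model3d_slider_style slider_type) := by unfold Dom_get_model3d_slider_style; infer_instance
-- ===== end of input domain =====

set_option maxRecDepth 100000
set_option maxHeartbeats 1000000


-- B replaces A's two duplicated CSS literals and recursive fallback by a structured block list serialized by a rendering loop (objective: alternative).
-- ===== PORT A =====
def get_model3d_slider_style (slider_type : String) : String :=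
  if slider_type == "building" then
    "\n            QSlider::groove:horizontal {\n                border: 1px solid #dee2e6;\n                background: #f8f9fa;\n                height: 8px;\n                border-radius: 4px;\n            }\n            QSlider::handle:horizontal {\n                background: #3498db;\n                border: 1px solid #3498db;\n                width: 18px;\n                margin: -5px 0;\n                border-radius: 9px;\n            }\n            QSlider::handle:horizontal:hover {\n                background: #2980b9;\n            }\n        "
  else if slider_type == "solar" then
    "\n            QSlider::groove:horizontal {\n                border: 1px solid #dee2e6;\n                background: #f8f9fa;\n                height: 8px;\n                border-radius: 4px;\n            }\n            QSlider::handle:horizontal {\n                background: #f39c12;\n                border: 1px solid #f39c12;\n                width: 18px;\n                margin: -5px 0;\n                border-radius: 9px;\n            }\n            QSlider::handle:horizontal:hover {\n                background: #e67e22;\n            }\n        "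
  else
    get_model3d_slider_style "building"
termination_by (if slider_type == "building" then 0 else 1)
decreasing_by simp_all

-- ===== PORT B =====
-- the block list of B, parameterized by the chosen accent/hover colors
def pvBlocks (accent hover : String) : List (String × List (String × String)) :=
  [("QSlider::groove:horizontal",
     [("border", "1px solid #dee2e6"),
      ("background", "#f8f9fa"),
      ("height", "8px"),
      ("border-radius", "4px")]),
   ("QSlider::handle:horizontal",
     [("background", accent),
      ("border", "1px solid " ++ accent),
      ("width", "18px"),
      ("margin", "-5px 0"),
      ("border-radius", "9px")]),
   ("QSlider::handle:horizontal:hover",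
     [("background", hover)])]

-- the inner 'for name, val in props' loop of B
def pvRenderProps (props : List (String × String)) (acc : String) : String :=
  props.foldl (fun out p => out ++ "                " ++ p.1 ++ ": " ++ p.2 ++ ";\n") acc

-- the outer 'for sel, props in blocks' loop of B
def pvRenderBlocks (blocks : List (String × List (String × String))) (acc : String) : String :=
  blocks.foldl (fun out b => pvRenderProps b.2 (out ++ "            " ++ b.1 ++ " {\n") ++ "            }\n") acc

def get_model3d_slider_style_alt (slider_type : String) : String :=
  let c := if slider_type == "solar" then ("#f39c12", "#e67e22") else ("#3498db", "#2980b9")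
  pvRenderBlocks (pvBlocks c.1 c.2) "\n" ++ "        "

-- ===== PRECONDITION & SPEC =====
def Spec_get_model3d_slider_style (slider_type : String) (out : String) : Prop := out = get_model3d_slider_style_alt slider_type
instance (slider_type : String) (out : String) : Decidable (Spec_get_model3d_slider_style slider_type out) := by unfold Spec_get_model3d_slider_style; infer_instance

-- ===== CLAIM =====
def Claim_equal_get_model3d_slider_style : Prop := ∀ (slider_type : String), Dom_get_model3d_slider_style slider_type → Spec_get_model3d_slider_style slider_type (get_model3d_slider_style slider_type)

-- ===== LEMMAS AND PROOFS =====
theorem alt_default {s : String} (h2 : s ≠ "solar") :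
    get_model3d_slider_style_alt s = get_model3d_slider_style_alt "building" := by
  simp [get_model3d_slider_style_alt, h2]

theorem case_building : get_model3d_slider_style "building" = get_model3d_slider_style_alt "building" := by
  rw [get_model3d_slider_style]; rfl

theorem case_solar : get_model3d_slider_style "solar" = get_model3d_slider_style_alt "solar" := by
  rw [get_model3d_slider_style]; rfl

-- ===== VERDICT =====
theorem get_model3d_slider_style_spec : Claim_equal_get_model3d_slider_style := by
  intro slider_type _
  unfold Spec_get_model3d_slider_style
  by_cases h1 : slider_type = "building"
  · subst h1; exact case_building
  · by_cases h2 : slider_type = "solar"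
    · subst h2; exact case_solar
    · rw [get_model3d_slider_style]
      simp only [h1, h2, beq_iff_eq, if_false]
      rw [alt_default h2]
      exact case_building
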